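/- GENERATED by tools/from_farm_form.py from prooffarm-gif/accepted/DGifGetPrefixChar/Lemmas.lean (a worked proof of the farm's unit `DGifGetPrefixChar`,
   accepted by the verdict) — do not edit. -/
import Gif.Spec.Units.DGifGetPrefixChar
import Gif.Spec.AllSegs

/-!
  Lemmas for the unit `DGifGetPrefixChar` (dgif_lib.c:1011-1022: follow `Prefix[]` from `Code` while `Code > ClearCode`).

  Everything general is in the tree (Gif/Spec/Words.lean: `word32_part_toInt`, `toInt_nonneg`, `sext32_bv`). What is left is the
  arithmetic of THIS loop's test:

      gpc_test_true           the three tests of l.1015-1016 let the body run: `Code` sign-extends to a number `c`, `1 ≤ c ≤ 4095`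
                              (an index of `Prefix[4096]`)
      gpc_pv_inside           where the private object is (from `HeapPre` and `H.Live pv 24936`)
      gpc_elem                `&Prefix[c]` as a number
      gpc_count_le            the counter test of l.1015 let the body run: `i ≤ 4095`
      gpc_succ                `lea ebx, [rdx + 1]`: the counter `i + 1` as a `Word`
-/

open X86 X86.User Asan ProgX.Base ProgX.Base.Spec Gif.Spec

namespace Gif.Spec.DGifGetPrefixChar

/-- **The loop test let the body run** (`cmp eax, r12d ; jle` not taken: `h1` is the walker's branch fact `hbr_10517a`;
`cmp eax, 0xfff ; jg` not taken: `h2` is `hbr_10518c`; both as they stand). `dx` = ClearCode is a non-negative `int` (the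
precondition), `ax` = Code is ANY 32-bit value. Then `cdqe` gives a number `c` with `ClearCode < c ≤ 4095`, so `1 ≤ c`: the
`Word` equation rewrites the walker's facts `w_rax`, `w_r13`, `w_rdi`. -/
theorem gpc_test_true (ax dx : Word) (hdx : dx.toNat % 2 ^ 32 < 2 ^ 31)
    (h1 : ¬ (Word.part .w32 ax).toInt ≤ (Word.part .w32 dx).toInt)
    (h2 : ¬ (4095#32).toInt < (Word.part .w32 ax).toInt) :
    ∃ c, 1 ≤ c ∧ c ≤ 4095 ∧ Word.ofBV (BitVec.signExtend 64 (Word.part .w32 ax)) = UInt64.ofNat c := by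
  -- the literal and ClearCode as numbers
  have e4095 : (4095#32).toInt = 4095 := by decide
  rw [word32_part_toInt dx hdx] at h1
  rw [e4095] at h2
  -- `Code` is above `ClearCode ≥ 0`: its signed value is its number
  have hnn : 0 ≤ (Word.part .w32 ax).toInt := by omega
  obtain ⟨hc1, hc2⟩ := toInt_nonneg _ hnn
  have hsx := sext32_bv _ hc2
  rw [hc1] at h1 h2
  exact ⟨(Word.part .w32 ax).toNat, by omega, by omega, hsx⟩

/-- **Where the private object is**: in the heap's region, its end below C00000H. What `u_omega` needs to place `&Prefix[Code]`
(no wrap of `rdi + 4 * Code`) and what makes the load miss the stack. -/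
theorem gpc_pv_inside {H : Heap} {rest : List Obj} {frames : List (Nat × FrameLayout)} {pv : Nat} {u : State}
    (hhp : HeapPre H rest frames u) (hlive : H.Live pv 24936) : 0x800040 ≤ pv ∧ pv + 24968 ≤ 0xC00000 := by
  obtain ⟨cap, hlc⟩ := hlive
  have hbase := hhp.base
  have h1 := hhp.inv.heap.obj_range hlc
  have h2 := hhp.inv.heap.obj_inside hlc
  simp only at h1 h2
  omega

/-- **`&Prefix[c]`** (`lea r13, [rbp + rax*4]` with `rax` = the index `c ≤ 4095`, `rbp` = `pv.Prefix`): the address as a number. -/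
theorem gpc_elem (p : Word) (pv c : Nat) (hp : p.toNat = pv + 8536) (hpv : pv + 24968 ≤ 0xC00000) (hc : c ≤ 4095) :
    (p + UInt64.ofNat c * 4).toNat = pv + 8536 + 4 * c := by
  have e : (UInt64.ofNat c).toNat = c := by
    rw [UInt64.toNat_ofNat']
    omega
  rw [add_mul4 p _ c e (by omega), hp]

/-- **The counter was at most 4095** (`cmp edx, 0xfff ; jg` not taken: `h` is the walker's branch fact `hbr_105185` as it stands;
`edx` = the counter `i` of the loop invariant, `i ≤ 4096`). -/
theorem gpc_count_le (i : Nat) (hi : i ≤ 4096)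
    (h : ¬ (4095#32).toInt < (Word.part .w32 (UInt64.ofNat i)).toInt) : i ≤ 4095 := by
  have e4095 : (4095#32).toInt = 4095 := by decide
  rw [e4095, cnt32_part_toInt i (by omega)] at h
  omega

/-- **`lea ebx, [rdx + 1]` of the counter `i`** (l.1015 `i++`): the register holds `i + 1`, as the `Word` equation of the loop
invariant. -/
theorem gpc_succ (i : Nat) (hi : i ≤ 4095) :
    Word.ofBV (BitVec.setWidth 32 (UInt64.ofNat i + 1).toBitVec) = UInt64.ofNat (i + 1) := by
  have e : (UInt64.ofNat i).toNat = i := by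
    rw [UInt64.toNat_ofNat']
    omega
  apply UInt64.toNat_inj.mp
  rw [lea32_succ _ (by omega), e, UInt64.toNat_ofNat']
  omega

end Gif.Spec.DGifGetPrefixChar
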